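-- pv_equiv track=rewrite | github.com/fkarg/uni-stuff | semester_two/algoDat/public/code/vorlesung-02/zero_one_sort_permutation.py | zero_one_sort
-- ===== SOURCE A (Python) =====
-- def zero_one_sort(array):
--     """
--     Sort using the simple 0-1-Sort algorithm from Vorlesung 2b.
--
--     >>> zero_one_sort([0, 1, 1, 0, 0, 1, 0])
--     [1, 5, 6, 2, 3, 7, 4]
--     >>> zero_one_sort([0, 0, 1, 0, 0, 1, 0])
--     [1, 2, 6, 3, 4, 7, 5]
--     >>> zero_one_sort([])
--     []
--     """
--
--     # Count the number of zeroes and ones.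
--     num_ones = 0
--     for x in array:
--         num_ones += x
--     num_zeroes = len(array) - num_ones
--
--     # Write num_zeroes times 0 followed by num_ones times 1.
--     result = [0] * len(array)
--     num_zeroes_seen = 0
--     num_ones_seen = 0
--     for i in range(0, len(array)):
--         if array[i] == 0:
--             num_zeroes_seen += 1
--             result[i] = num_zeroes_seen
--         else:
--             num_ones_seen += 1
--             result[i] = num_zeroes + num_ones_seen
--     return result
-- ===== SOURCE B (Python) =====
-- def zero_one_sort(array):
--     # Prefix-table formulation: build ones_prefix once, then compute each
--     # rank by closed-form arithmetic instead of branching counters.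
--     num_zeroes = len(array) - sum(array)
--     ones_prefix = []
--     c = 0
--     for x in array:
--         if x != 0:
--             c += 1
--         ones_prefix.append(c)
--     return [num_zeroes + ones_prefix[i] if array[i] != 0
--             else i + 1 - ones_prefix[i]
--             for i in range(len(array))]
-- ===== Notes on version B (the rewrite author's own statement) =====
-- stated objective: alternative
-- what changed: Replaces the branching two-counter state machine with a precomputed prefix table of nonzero counts and a closed-form arithmetic rank pass (zeros-so-far = i+1 - ones_prefix[i]).
import Mathlib
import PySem

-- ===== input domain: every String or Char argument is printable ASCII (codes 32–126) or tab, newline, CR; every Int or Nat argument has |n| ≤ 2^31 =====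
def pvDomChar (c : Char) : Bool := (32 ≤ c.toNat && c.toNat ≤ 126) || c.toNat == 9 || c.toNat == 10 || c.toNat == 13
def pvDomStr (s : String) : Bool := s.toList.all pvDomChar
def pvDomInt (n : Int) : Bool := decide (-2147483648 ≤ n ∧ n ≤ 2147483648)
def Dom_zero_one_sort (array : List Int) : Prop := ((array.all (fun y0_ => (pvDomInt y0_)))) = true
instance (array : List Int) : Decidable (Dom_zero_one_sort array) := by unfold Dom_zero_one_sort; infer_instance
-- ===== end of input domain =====

-- B replaces A's branching two-counter state machine by a precomputed prefix table
-- of nonzero counts plus a closed-form rank pass (objective: alternative, same O(n)).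

-- ===== PORT A =====
-- body of A's second loop, state (result, num_zeroes_seen, num_ones_seen)
def zosStep (array : List Int) (numZeroes : Int)
    (st : List Int × Int × Int) (i : Int) : List Int × Int × Int :=
  match st with
  | (result, zs, os) =>
    if PySem.List.pyGetD array i 0 = 0 then
      (PySem.List.pySetD result i (zs + 1), zs + 1, os)
    else
      (PySem.List.pySetD result i (numZeroes + (os + 1)), zs, os + 1)

def zero_one_sort (array : List Int) : List Int :=
  let numOnes := array.foldl (fun acc x => acc + x) 0
  let numZeroes := (array.length : Int) - numOnes
  let result := List.replicate array.length (0 : Int)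
  ((PySem.List.pyRange 0 array.length 1).foldl (zosStep array numZeroes)
      (result, 0, 0)).1

-- ===== PORT B =====
-- prefix loop of Source B: append the running count of nonzero elements
def altPrefixStep (st : List Int × Int) (x : Int) : List Int × Int :=
  let c := if x ≠ 0 then st.2 + 1 else st.2
  (st.1 ++ [c], c)

def zero_one_sort_alt (array : List Int) : List Int :=
  let numZeroes := (array.length : Int) - array.sum
  let onesPrefix := (array.foldl altPrefixStep ([], 0)).1
  (PySem.List.pyRange 0 array.length 1).map (fun i =>
    if PySem.List.pyGetD array i 0 ≠ 0 then
      numZeroes + PySem.List.pyGetD onesPrefix i 0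
    else
      i + 1 - PySem.List.pyGetD onesPrefix i 0)

-- ===== PRECONDITION & SPEC =====
def Spec_zero_one_sort (array : List Int) (out : List Int) : Prop := out = zero_one_sort_alt array
instance (array : List Int) (out : List Int) : Decidable (Spec_zero_one_sort array out) := by unfold Spec_zero_one_sort; infer_instance

-- ===== CLAIM (what is proved, stated in full; the proofs are below) =====
def Claim_equal_zero_one_sort : Prop := ∀ (array : List Int), Dom_zero_one_sort array → Spec_zero_one_sort array (zero_one_sort array)

-- ===== LEMMAS AND PROOFS =====

/-- number of nonzero elements among the first `n` elements, as an `Int` -/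
def onesUpTo (array : List Int) (n : Nat) : Int :=
  ((array.take n).countP (fun x => decide (x ≠ 0)) : Int)

/-- the rank both programs assign to position `j` -/
def rankF (array : List Int) (nz : Int) (j : Nat) : Int :=
  if array.getD j 0 = 0 then (j + 1 : Int) - onesUpTo array (j + 1)
  else nz + onesUpTo array (j + 1)

theorem onesUpTo_succ (array : List Int) (n : Nat) (h : n < array.length) :
    onesUpTo array (n + 1)
      = onesUpTo array n + (if array.getD n 0 ≠ 0 then 1 else 0) := by
  unfold onesUpTo
  rw [List.take_add_one, List.countP_append]
  have : array[n]? = some array[n] := List.getElem?_eq_getElem h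
  simp [this, List.getD_eq_getElem?_getD, List.countP_cons]

theorem set_map_range {α : Type} (f : Nat → α) (len n : Nat) (v : α) (h : n < len) :
    ((List.range len).map f).set n v
      = (List.range len).map (fun j => if j = n then v else f j) := by
  apply List.ext_getElem
  · simp
  · intro i h1 h2
    have hi : i < len := by simpa using h2
    simp only [List.getElem_set, List.getElem_map, List.getElem_range]
    by_cases hji : i = n
    · simp [hji]
    · simp only [hji, if_false]
      rw [if_neg (fun h' => hji h'.symm)]

theorem foldA_invariant (array : List Int) (nz : Int) (n : Nat)
    (h : n ≤ array.length) :
    (PySem.List.pyRange 0 n 1).foldl (zosStep array nz)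
        (List.replicate array.length (0 : Int), 0, 0)
      = ((List.range array.length).map
            (fun j => if j < n then rankF array nz j else 0),
         (n : Int) - onesUpTo array n, onesUpTo array n) := by
  induction n with
  | zero =>
    simp [PySem.List.pyRange_one_eq_nil, onesUpTo]
  | succ n ih =>
    have hn : n < array.length := h
    have hrange : PySem.List.pyRange 0 (↑(n+1)) 1
        = PySem.List.pyRange 0 (↑n) 1 ++ [(n : Int)] := by
      push_cast
      exact PySem.List.pyRange_one_succ_right (by positivity)
    rw [hrange, List.foldl_append, ih (le_of_lt hn)]
    simp only [List.foldl_cons, List.foldl_nil]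
    unfold zosStep
    have hget : PySem.List.pyGetD array (n : Int) 0 = array.getD n 0 := by simp
    have hmap : ∀ v : Int, v = rankF array nz n →
        (List.range array.length).map
            (fun j => if j = n then v else if j < n then rankF array nz j else 0)
          = (List.range array.length).map
              (fun j => if j < n + 1 then rankF array nz j else 0) := by
      intro v hv
      apply List.map_congr_left
      intro j _
      rcases lt_trichotomy j n with hj | hj | hj <;>
        simp [hj, hv] <;> omega
    by_cases h0 : array.getD n 0 = 0
    · simp only [hget, h0]
      refine Prod.ext ?_ (Prod.ext ?_ ?_)
      · show PySem.List.pySetD _ (n : Int) _ = _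
        rw [PySem.List.pySetD_natCast, set_map_range _ _ _ _ hn]
        apply hmap
        rw [rankF, if_pos h0, onesUpTo_succ array n hn, if_neg (not_not_intro h0)]
        push_cast; ring
      · show ((n : Int) - onesUpTo array n) + 1 = (↑(n+1) : Int) - onesUpTo array (n+1)
        rw [onesUpTo_succ array n hn, if_neg (not_not_intro h0)]
        push_cast; ring
      · show onesUpTo array n = onesUpTo array (n+1)
        rw [onesUpTo_succ array n hn, if_neg (not_not_intro h0)]; try ring
    · simp only [hget, if_neg h0]
      refine Prod.ext ?_ (Prod.ext ?_ ?_)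
      · show PySem.List.pySetD _ (n : Int) _ = _
        rw [PySem.List.pySetD_natCast, set_map_range _ _ _ _ hn]
        apply hmap
        rw [rankF, if_neg h0, onesUpTo_succ array n hn, if_pos h0]
        try ring
      · show (n : Int) - onesUpTo array n = (↑(n+1) : Int) - onesUpTo array (n+1)
        rw [onesUpTo_succ array n hn, if_pos h0]
        push_cast; ring
      · show onesUpTo array n + 1 = onesUpTo array (n+1)
        rw [onesUpTo_succ array n hn, if_pos h0]
        try ring

theorem foldB_invariant (xs : List Int) (l : List Int) (c : Int) :
    xs.foldl altPrefixStep (l, c)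
      = (l ++ (List.range xs.length).map (fun j => c + onesUpTo xs (j + 1)),
         c + onesUpTo xs xs.length) := by
  induction xs generalizing l c with
  | nil => simp [onesUpTo]
  | cons x xs ih =>
    have step : altPrefixStep (l, c) x
        = (l ++ [c + (if x ≠ 0 then 1 else 0)], c + (if x ≠ 0 then 1 else 0)) := by
      unfold altPrefixStep; split_ifs <;> simp_all
    have hcnt : ∀ m : Nat, onesUpTo (x :: xs) (m + 1)
        = (if x ≠ 0 then 1 else 0) + onesUpTo xs m := by
      intro m
      unfold onesUpTo
      simp [List.countP_cons]
      split_ifs <;> simp_all <;> omega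
    rw [List.foldl_cons, step, ih]
    refine Prod.ext ?_ ?_
    · show l ++ [c + if x ≠ 0 then 1 else 0] ++ _ = l ++ _
      rw [List.append_assoc]
      congr 1
      simp only [List.length_cons, List.range_succ_eq_map, List.map_cons, List.map_map,
        List.singleton_append]
      congr 1
      · rw [hcnt 0]; simp [onesUpTo]
      · apply List.map_congr_left
        intro j _
        simp only [Function.comp]
        rw [hcnt (j + 1)]
        ring
    · show (c + if x ≠ 0 then 1 else 0) + onesUpTo xs xs.length
          = c + onesUpTo (x :: xs) (x :: xs).length
      simp only [List.length_cons, hcnt xs.length]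
      ring

theorem sum_eq_foldl' (xs : List Int) :
    xs.foldl (fun acc x => acc + x) 0 = xs.sum := by
  simp [List.sum_eq_foldl]

-- ===== VERDICT (by name: the statement is the Claim_ definition above) =====
theorem zero_one_sort_spec : Claim_equal_zero_one_sort := by
  intro array _
  unfold Spec_zero_one_sort
  unfold zero_one_sort zero_one_sort_alt
  simp only [sum_eq_foldl']
  rw [foldA_invariant array ((array.length : Int) - array.sum) array.length le_rfl,
    foldB_invariant array [] 0]
  simp only [List.nil_append]
  rw [PySem.List.pyRange_zero_nat, List.map_map]
  apply List.map_congr_left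
  intro j hj
  have hjlen : j < array.length := List.mem_range.mp hj
  have hpre : PySem.List.pyGetD ((List.range array.length).map (fun k => 0 + onesUpTo array (k+1))) (j : Int) 0 = onesUpTo array (j+1) := by
    rw [PySem.List.pyGetD_natCast, List.getD_eq_getElem?_getD, List.getElem?_map,
      List.getElem?_range hjlen]
    simp
  simp only [Function.comp, hpre]
  have hget : PySem.List.pyGetD array (j : Int) 0 = array.getD j 0 := by simp
  rw [hget, if_pos hjlen, rankF]
  by_cases h0 : array.getD j 0 = 0
  · rw [if_pos h0, if_neg (not_not_intro h0)]
  · rw [if_neg h0, if_pos h0]
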